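-- pv_equiv track=rewrite | github.com/francescogoia/Lab02 | translator.py | controlla_parola_wildcard
-- ===== SOURCE A (Python) =====
-- def controlla_parola_wildcard(parola):
--     lista_parola = parola.split("?")
--     for sezione in lista_parola:
--         if len(lista_parola) > 2 :
--             return False
--         for lettera in sezione:
--             if lettera < "a" or lettera > "z":
--                 return False
--     return True
-- ===== SOURCE B (Python) =====
-- def controlla_parola_wildcard(parola):
--     # one flat pass: count '?' as we go, validate every other char as lowercase a-z
--     q = 0
--     for c in parola:
--         if c == "?":
--             q += 1
--             if q > 1:
--                 return False
--         elif c < "a" or c > "z":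
--             return False
--     return True
-- ===== Notes on version B (the rewrite author's own statement) =====
-- stated objective: simpler
-- what changed: Replaces the split-into-sections list and nested loop with one flat left-to-right scan that keeps a wildcard counter and validates each other character as a lowercase letter directly.
import Mathlib
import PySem

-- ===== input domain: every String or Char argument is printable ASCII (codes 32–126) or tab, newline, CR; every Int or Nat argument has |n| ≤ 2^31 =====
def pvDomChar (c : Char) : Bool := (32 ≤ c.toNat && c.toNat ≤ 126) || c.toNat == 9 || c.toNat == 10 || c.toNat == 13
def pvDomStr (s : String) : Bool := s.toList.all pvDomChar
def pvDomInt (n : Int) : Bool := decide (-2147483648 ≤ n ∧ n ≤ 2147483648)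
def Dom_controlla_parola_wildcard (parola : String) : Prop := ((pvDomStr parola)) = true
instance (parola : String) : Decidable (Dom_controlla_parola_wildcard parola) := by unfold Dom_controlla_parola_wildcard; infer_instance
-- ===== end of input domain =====

-- B replaces A's split-into-sections and nested loop by one flat scan with a wildcard counter (objective: simpler).

-- ===== PORT A =====
-- inner loop: 'for lettera in sezione: if lettera < "a" or lettera > "z": return False'
def pvAInner : List Char → Bool
  | [] => true
  | c :: rest => if c < 'a' || 'z' < c then false else pvAInner rest

-- outer loop over the sections; 'len' is len(lista_parola), checked inside the loop as in A
def pvALoop (len : Nat) : List (List Char) → Bool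
  | [] => true
  | sez :: rest =>
      if len > 2 then false
      else if pvAInner sez then pvALoop len rest else false

def controlla_parola_wildcard (parola : String) : Bool :=
  let lista_parola := PySem.Chars.splitOn parola.toList ['?']   -- parola.split("?"), sep ≠ ""
  pvALoop lista_parola.length lista_parola

-- ===== PORT B =====
-- flat scan: q counts '?' seen so far
def pvBLoop : List Char → Nat → Bool
  | [], _ => true
  | c :: rest, q =>
      if c = '?' then
        if q + 1 > 1 then false else pvBLoop rest (q + 1)
      else if c < 'a' || 'z' < c then false
      else pvBLoop rest q

def controlla_parola_wildcard_alt (parola : String) : Bool :=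
  pvBLoop parola.toList 0

-- ===== PRECONDITION & SPEC =====
def Spec_controlla_parola_wildcard (parola : String) (out : Bool) : Prop := out = controlla_parola_wildcard_alt parola
instance (parola : String) (out : Bool) : Decidable (Spec_controlla_parola_wildcard parola out) := by unfold Spec_controlla_parola_wildcard; infer_instance

-- ===== CLAIM (what is proved, stated in full; the proofs are below) =====
def Claim_equal_controlla_parola_wildcard : Prop := ∀ (parola : String), Dom_controlla_parola_wildcard parola → Spec_controlla_parola_wildcard parola (controlla_parola_wildcard parola)

-- ===== LEMMAS AND PROOFS =====

-- simple structural model of split on the single-char separator '?'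
def pvSplit : List Char → List (List Char)
  | [] => [[]]
  | c :: rest => if c = '?' then [] :: pvSplit rest else (pvSplit rest).modifyHead (c :: ·)

theorem pvSplit_ne_nil (cs : List Char) : pvSplit cs ≠ [] := by
  induction cs with
  | nil => simp [pvSplit]
  | cons c rest ih =>
      simp only [pvSplit]
      split
      · simp
      · cases h : pvSplit rest with
        | nil => exact absurd h ih
        | cons s ss => simp [List.modifyHead]

theorem pvGo_eq (fuel : Nat) (l cur : List Char) (acc : List (List Char))
    (h : l.length < fuel) :
    PySem.Chars.splitOn.go ['?'] fuel l cur acc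
      = acc.reverse ++ (pvSplit l).modifyHead (cur.reverse ++ ·) := by
  induction fuel generalizing l cur acc with
  | zero => omega
  | succ f ih =>
      cases l with
      | nil => simp [PySem.Chars.splitOn.go, pvSplit, List.modifyHead]
      | cons c rest =>
          by_cases hc : c = '?'
          · subst hc
            rw [show PySem.Chars.splitOn.go ['?'] (f+1) ('?' :: rest) cur acc
                  = PySem.Chars.splitOn.go ['?'] f rest [] (cur.reverse :: acc) by
                simp [PySem.Chars.splitOn.go, List.isPrefixOf]]
            rw [ih rest [] (cur.reverse :: acc) (by simpa using Nat.lt_of_succ_lt_succ h)]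
            have hm : (pvSplit rest).modifyHead (fun x => List.reverse [] ++ x) = pvSplit rest := by
              cases pvSplit rest with
              | nil => rfl
              | cons a l => simp [List.modifyHead]
            rw [hm, show pvSplit ('?' :: rest) = [] :: pvSplit rest from by simp [pvSplit]]
            simp [List.modifyHead]
          · rw [show PySem.Chars.splitOn.go ['?'] (f+1) (c :: rest) cur acc
                  = PySem.Chars.splitOn.go ['?'] f rest (c :: cur) acc by
                simp [PySem.Chars.splitOn.go, List.isPrefixOf, Ne.symm hc]]
            rw [ih rest (c :: cur) acc (by simpa using Nat.lt_of_succ_lt_succ h)]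
            simp only [pvSplit, if_neg hc]
            cases hs : pvSplit rest with
            | nil => exact absurd hs (pvSplit_ne_nil rest)
            | cons s ss => simp [List.modifyHead]

theorem pvSplitOn_eq (cs : List Char) : PySem.Chars.splitOn cs ['?'] = pvSplit cs := by
  unfold PySem.Chars.splitOn
  rw [pvGo_eq (cs.length + 1) cs [] [] (by omega)]
  cases h : pvSplit cs with
  | nil => exact absurd h (pvSplit_ne_nil cs)
  | cons s ss => simp [List.modifyHead]

theorem pvSplit_length (cs : List Char) : (pvSplit cs).length = cs.count '?' + 1 := by
  induction cs with
  | nil => simp [pvSplit]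
  | cons c rest ih =>
      by_cases hc : c = '?'
      · subst hc; simp [pvSplit, ih]
      · simp only [pvSplit, if_neg hc]
        cases hs : pvSplit rest with
        | nil => exact absurd hs (pvSplit_ne_nil rest)
        | cons s ss =>
            simp only [List.modifyHead, List.length]
            rw [hs] at ih
            simp only [List.length] at ih
            simp [hc, ih]

theorem pvSplit_all (cs : List Char) :
    (pvSplit cs).all pvAInner = cs.all (fun c => c == '?' || !(c < 'a' || 'z' < c)) := by
  induction cs with
  | nil => simp [pvSplit, pvAInner]
  | cons c rest ih =>
      by_cases hc : c = '?'
      · subst hc; simp [pvSplit, pvAInner, ih]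
      · simp only [pvSplit, if_neg hc]
        cases hs : pvSplit rest with
        | nil => exact absurd hs (pvSplit_ne_nil rest)
        | cons s ss =>
            rw [hs] at ih
            by_cases hok : (decide (c < 'a') || decide ('z' < c)) = true
            · have h1 : pvAInner (c :: s) = false := by simp [pvAInner, hok]
              have h2 : (c == '?' || !(decide (c < 'a') || decide ('z' < c))) = false := by
                simp [hc, hok]
              simp only [List.modifyHead, List.all_cons, h1, h2, Bool.false_and]
            · rw [Bool.not_eq_true] at hok
              have h1 : pvAInner (c :: s) = pvAInner s := by simp [pvAInner, hok]
              have h2 : (c == '?' || !(decide (c < 'a') || decide ('z' < c))) = true := by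
                simp [hok]
              simp only [List.modifyHead, List.all_cons, h1, h2, Bool.true_and]
              rw [← List.all_cons, ih]

theorem pvALoop_big (len : Nat) (secs : List (List Char)) (h : len > 2) (hne : secs ≠ []) :
    pvALoop len secs = false := by
  cases secs with
  | nil => exact absurd rfl hne
  | cons s ss => simp [pvALoop, h]

theorem pvALoop_small (len : Nat) (secs : List (List Char)) (h : ¬ len > 2) :
    pvALoop len secs = secs.all pvAInner := by
  induction secs with
  | nil => simp [pvALoop]
  | cons s ss ih =>
      simp only [pvALoop, if_neg h, List.all_cons]
      by_cases hs : pvAInner s = true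
      · simp [hs, ih]
      · rw [Bool.not_eq_true] at hs; simp [hs]

theorem pvBLoop_eq (cs : List Char) (q : Nat) (hq : q ≤ 1) :
    pvBLoop cs q = (decide (cs.count '?' + q ≤ 1)
      && cs.all (fun c => c == '?' || !(c < 'a' || 'z' < c))) := by
  induction cs generalizing q with
  | nil => simp [pvBLoop, hq]
  | cons c rest ih =>
      by_cases hc : c = '?'
      · subst hc
        by_cases h1 : q = 1
        · subst h1
          simp [pvBLoop]
        · have h0 : q = 0 := by omega
          subst h0
          have step : pvBLoop ('?' :: rest) 0 = pvBLoop rest 1 := by simp [pvBLoop]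
          rw [step, ih 1 (by omega)]
          simp
      · by_cases hok : (decide (c < 'a') || decide ('z' < c)) = true
        · have h2 : (c == '?' || !(decide (c < 'a') || decide ('z' < c))) = false := by
            simp [hc, hok]
          have step : pvBLoop (c :: rest) q = false := by simp [pvBLoop, hc, hok]
          rw [step]
          simp only [List.all_cons, h2, Bool.false_and, Bool.and_false]
        · rw [Bool.not_eq_true] at hok
          have h2 : (c == '?' || !(decide (c < 'a') || decide ('z' < c))) = true := by
            simp [hok]
          have step : pvBLoop (c :: rest) q = pvBLoop rest q := by simp [pvBLoop, hc, hok]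
          rw [step, ih q hq]
          have hcount : List.count '?' (c :: rest) = List.count '?' rest := by
            simp [hc]
          simp only [hcount, List.all_cons, h2, Bool.true_and]

-- ===== VERDICT (by name: the statement is the Claim_ definition above) =====
theorem controlla_parola_wildcard_spec : Claim_equal_controlla_parola_wildcard := by
  intro parola _
  unfold Spec_controlla_parola_wildcard controlla_parola_wildcard controlla_parola_wildcard_alt
  simp only [pvSplitOn_eq]
  set cs := parola.toList with hcs
  rw [pvBLoop_eq cs 0 (by omega)]
  by_cases hbig : cs.count '?' + 1 > 2
  · rw [pvALoop_big _ _ (by rw [pvSplit_length]; omega) (pvSplit_ne_nil cs)]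
    have hd : decide (cs.count '?' + 0 ≤ 1) = false := by
      simp only [decide_eq_false_iff_not]; omega
    rw [hd, Bool.false_and]
  · rw [pvALoop_small _ _ (by rw [pvSplit_length]; omega), pvSplit_all]
    have hd : decide (cs.count '?' + 0 ≤ 1) = true := by
      simp only [decide_eq_true_eq]; omega
    rw [hd, Bool.true_and]
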